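-- pv_equiv track=rewrite | github.com/INDRIX-MK2/horror-video-pipeline | subtitles/build_ass.py | group_lines
-- ===== SOURCE A (Python) =====
-- from typing import List, Tuple
--
-- def group_lines(tokens: List[str], cs: List[int]) -> List[Tuple[List[str], List[int]]]:
--     """
--     Regroupe en lignes lisibles (~4–8 tokens), et >= 1.2s par ligne si possible.
--     """
--     lines = []
--     buf_toks, buf_cs = [], []
--     acc = 0
--     # bornes
--     min_line_cs = 120  # 1.2s
--     max_tokens = 8
--     soft_tokens = 6
--
--     for i, (w, k) in enumerate(zip(tokens, cs)):
--         buf_toks.append(w)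
--         buf_cs.append(k)
--         acc += k
--
--         end_of_sentence = (w in [".", "!", "?", "…"])
--         enough_tokens = (len(buf_toks) >= soft_tokens)
--         hard_cap = (len(buf_toks) >= max_tokens)
--         enough_time = (acc >= min_line_cs)
--
--         if end_of_sentence and enough_time:
--             lines.append((buf_toks, buf_cs))
--             buf_toks, buf_cs, acc = [], [], 0
--         elif hard_cap and enough_time:
--             lines.append((buf_toks, buf_cs))
--             buf_toks, buf_cs, acc = [], [], 0
--
--     if buf_toks:
--         lines.append((buf_toks, buf_cs))
--     return lines
-- ===== SOURCE B (Python) =====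
-- ENDERS = (".", "!", "?", "\u2026")
--
--
-- def _line_break(pairs, start):
--     """End index (exclusive) of the readable line starting at `start`
--     (the end of the list if no break fires)."""
--     acc = 0
--     j = start
--     n = len(pairs)
--     while j < n:
--         w, c = pairs[j]
--         acc += c
--         j += 1
--         if acc >= 120 and (w in ENDERS or j - start >= 8):
--             return j
--     return j
--
--
-- def group_lines(tokens, cs):
--     pairs = list(zip(tokens, cs))
--     lines = []
--     i = 0
--     n = len(pairs)
--     while i < n:
--         j = _line_break(pairs, i)
--         chunk = pairs[i:j]
--         lines.append(([w for w, _ in chunk], [c for _, c in chunk]))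
--         i = j
--     return lines
-- ===== Notes on version B (the rewrite author's own statement) =====
-- stated objective: alternative
-- what changed: Replaces A's single fold over a mutable (lines, buffer, acc) state machine by a splitter decomposition: a helper computes the length of the first line from a fresh (acc, count) scan, and the top level repeatedly slices that line off and recurses, with no cross-line buffer state.
import Mathlib
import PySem

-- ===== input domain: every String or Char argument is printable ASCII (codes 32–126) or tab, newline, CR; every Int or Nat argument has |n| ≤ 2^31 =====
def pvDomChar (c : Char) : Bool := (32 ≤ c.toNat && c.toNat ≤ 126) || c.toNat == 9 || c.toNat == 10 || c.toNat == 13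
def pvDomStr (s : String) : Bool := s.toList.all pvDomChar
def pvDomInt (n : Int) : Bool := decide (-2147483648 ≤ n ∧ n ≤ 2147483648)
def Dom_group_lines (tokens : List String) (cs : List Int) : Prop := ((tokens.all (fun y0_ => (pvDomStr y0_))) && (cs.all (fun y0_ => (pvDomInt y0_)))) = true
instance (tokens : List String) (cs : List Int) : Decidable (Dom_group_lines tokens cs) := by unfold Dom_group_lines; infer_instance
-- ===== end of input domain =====

-- B is an alternative decomposition (line-splitter helper + repeated slicing) of A's
-- one-pass buffer state machine; same values, same O(n) cost.

-- ===== PORT A =====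
-- single fold over zip(tokens, cs) carrying (lines, buf_toks, buf_cs, acc);
-- the Python's dead `enough_tokens`/`soft_tokens` bindings are omitted (unused).
def group_lines (tokens : List String) (cs : List Int) : List (List String × List Int) :=
  let st :=
    (tokens.zip cs).foldl
      (fun (st : List (List String × List Int) × List String × List Int × Int) (wk : String × Int) =>
        let lines := st.1
        let bufT := st.2.1 ++ [wk.1]
        let bufC := st.2.2.1 ++ [wk.2]
        let acc := st.2.2.2 + wk.2
        if (wk.1 ∈ ([".", "!", "?", "…"] : List String)) ∧ acc ≥ 120 then
          (lines ++ [(bufT, bufC)], [], [], 0)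
        else if bufT.length ≥ 8 ∧ acc ≥ 120 then
          (lines ++ [(bufT, bufC)], [], [], 0)
        else
          (lines, bufT, bufC, acc))
      ([], [], [], 0)
  if st.2.1 ≠ [] then st.1 ++ [(st.2.1, st.2.2.1)] else st.1

-- ===== PORT B =====
-- `_line_break`: scan with (acc, j), return j at the first break (or the whole list's length)
def takeLineGo : List (String × Int) → Int → Nat → Nat
  | [], _, j => j
  | (w, k) :: rest, acc, j =>
    let acc' := acc + k
    let j' := j + 1
    if acc' ≥ 120 ∧ (w ∈ ([".", "!", "?", "…"] : List String) ∨ j' ≥ 8) then j'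
    else takeLineGo rest acc' j'

theorem takeLineGo_ge : ∀ (l : List (String × Int)) (a : Int) (j : Nat), j ≤ takeLineGo l a j := by
  intro l
  induction l with
  | nil => intro a j; simp [takeLineGo]
  | cons p rest ih =>
    intro a j
    obtain ⟨w, k⟩ := p
    simp only [takeLineGo]
    split
    · omega
    · exact le_trans (by omega) (ih (a + k) (j + 1))

theorem takeLineGo_pos (p : String × Int) (rest : List (String × Int)) (a : Int) (j : Nat) :
    j + 1 ≤ takeLineGo (p :: rest) a j := by
  obtain ⟨w, k⟩ := p
  simp only [takeLineGo]
  split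
  · omega
  · exact le_trans (by omega) (takeLineGo_ge _ _ (j + 1))

-- the `while pairs:` loop: slice off the first line, recurse on the rest
def groupGo : List (String × Int) → List (List String × List Int)
  | [] => []
  | p :: rest =>
    let j := takeLineGo (p :: rest) 0 0
    (((p :: rest).take j).map Prod.fst, ((p :: rest).take j).map Prod.snd)
      :: groupGo ((p :: rest).drop j)
termination_by pairs => pairs.length
decreasing_by
  have h1 : 1 ≤ takeLineGo (p :: rest) 0 0 := takeLineGo_pos p rest 0 0
  simp only [List.length_drop, List.length_cons]
  omega

def group_lines_alt (tokens : List String) (cs : List Int) : List (List String × List Int) :=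
  groupGo (tokens.zip cs)

-- ===== PRECONDITION & SPEC =====
def Spec_group_lines (tokens : List String) (cs : List Int) (out : List (List String × List Int)) : Prop := out = group_lines_alt tokens cs
instance (tokens : List String) (cs : List Int) (out : List (List String × List Int)) : Decidable (Spec_group_lines tokens cs out) := by unfold Spec_group_lines; infer_instance

-- ===== CLAIM (what is proved, stated in full; the proofs are below) =====
def Claim_equal_group_lines : Prop := ∀ (tokens : List String) (cs : List Int), Dom_group_lines tokens cs → Spec_group_lines tokens cs (group_lines tokens cs)

-- ===== LEMMAS AND PROOFS =====

-- recursive restatement of A's state machine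
def specA : List (String × Int) → List String → List Int → Int → List (List String × List Int)
  | [], bT, bC, _ => if bT ≠ [] then [(bT, bC)] else []
  | (w, k) :: rest, bT, bC, acc =>
    let bT' := bT ++ [w]
    let bC' := bC ++ [k]
    let acc' := acc + k
    if (w ∈ ([".", "!", "?", "…"] : List String)) ∧ acc' ≥ 120 then
      (bT', bC') :: specA rest [] [] 0
    else if bT'.length ≥ 8 ∧ acc' ≥ 120 then
      (bT', bC') :: specA rest [] [] 0
    else
      specA rest bT' bC' acc'

theorem specA_sound (pairs : List (String × Int)) :
    ∀ (lines : List (List String × List Int)) (bT : List String) (bC : List Int) (acc : Int),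
    (let st := pairs.foldl
      (fun (st : List (List String × List Int) × List String × List Int × Int) (wk : String × Int) =>
        let lines := st.1
        let bufT := st.2.1 ++ [wk.1]
        let bufC := st.2.2.1 ++ [wk.2]
        let acc := st.2.2.2 + wk.2
        if (wk.1 ∈ ([".", "!", "?", "…"] : List String)) ∧ acc ≥ 120 then
          (lines ++ [(bufT, bufC)], [], [], 0)
        else if bufT.length ≥ 8 ∧ acc ≥ 120 then
          (lines ++ [(bufT, bufC)], [], [], 0)
        else
          (lines, bufT, bufC, acc)) (lines, bT, bC, acc)
     if st.2.1 ≠ [] then st.1 ++ [(st.2.1, st.2.2.1)] else st.1)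
    = lines ++ specA pairs bT bC acc := by
  induction pairs with
  | nil =>
    intro lines bT bC acc
    simp only [List.foldl, specA]
    split <;> simp_all
  | cons p rest ih =>
    intro lines bT bC acc
    obtain ⟨w, k⟩ := p
    simp only [List.foldl, specA]
    split
    · rw [ih]; simp
    · split
      · rw [ih]; simp
      · rw [ih]

theorem specA_line (pairs : List (String × Int)) :
    ∀ (bT : List String) (bC : List Int) (acc : Int),
    bT.length = bC.length → (bT ≠ [] ∨ pairs ≠ []) →
    specA pairs bT bC acc =
      (bT ++ (pairs.take (takeLineGo pairs acc bT.length - bT.length)).map Prod.fst,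
       bC ++ (pairs.take (takeLineGo pairs acc bT.length - bT.length)).map Prod.snd)
        :: specA (pairs.drop (takeLineGo pairs acc bT.length - bT.length)) [] [] 0 := by
  induction pairs with
  | nil =>
    intro bT bC acc hlen hne
    have hbT : bT ≠ [] := by tauto
    simp [specA, takeLineGo, hbT]
  | cons p rest ih =>
    intro bT bC acc hlen hne
    obtain ⟨w, k⟩ := p
    simp only [specA, takeLineGo]
    by_cases htime : acc + k ≥ 120
    · by_cases heos : w ∈ ([".", "!", "?", "…"] : List String)
      · -- end-of-sentence break: both cut after this token
        have hc1 : ((w ∈ ([".", "!", "?", "…"] : List String)) ∧ acc + k ≥ 120) := ⟨heos, htime⟩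
        have hc2 : (acc + k ≥ 120 ∧ (w ∈ ([".", "!", "?", "…"] : List String) ∨ bT.length + 1 ≥ 8)) :=
          ⟨htime, Or.inl heos⟩
        simp [hc1]
      · by_cases hhard : bT.length + 1 ≥ 8
        · have hc1 : ¬ ((w ∈ ([".", "!", "?", "…"] : List String)) ∧ acc + k ≥ 120) := by tauto
          have hc1' : ((bT ++ [w]).length ≥ 8 ∧ acc + k ≥ 120) := by
            simp [List.length_append]; omega
          have hmem : ¬ (w = "." ∨ w = "!" ∨ w = "?" ∨ w = "…") := by simpa using heos
          have h7 : 7 ≤ bT.length := by omega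
          simp [hc1', hmem, h7]
        · -- no break at this token
          have hc1 : ¬ ((w ∈ ([".", "!", "?", "…"] : List String)) ∧ acc + k ≥ 120) := by tauto
          have hc1' : ¬ ((bT ++ [w]).length ≥ 8 ∧ acc + k ≥ 120) := by
            simp [List.length_append]; omega
          have hc2 : ¬ (acc + k ≥ 120 ∧ (w ∈ ([".", "!", "?", "…"] : List String) ∨ bT.length + 1 ≥ 8)) := by
            tauto
          simp only [hc1, hc1', hc2, if_false]
          rw [ih (bT ++ [w]) (bC ++ [k]) (acc + k) (by simp [hlen]) (Or.inl (by simp))]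
          have hge : bT.length + 1 ≤ takeLineGo rest (acc + k) (bT.length + 1) :=
            takeLineGo_ge rest (acc + k) (bT.length + 1)
          have hlen' : (bT ++ [w]).length = bT.length + 1 := by simp
          have hlenC : (bC ++ [k]).length = bT.length + 1 := by simp [hlen]
          rw [hlen']
          have hsub : takeLineGo rest (acc + k) (bT.length + 1) - bT.length
              = (takeLineGo rest (acc + k) (bT.length + 1) - (bT.length + 1)) + 1 := by omega
          rw [hsub]
          simp [List.take_succ_cons, List.drop_succ_cons]
    · -- not enough time: no break at this token
      have hc1 : ¬ ((w ∈ ([".", "!", "?", "…"] : List String)) ∧ acc + k ≥ 120) := by tauto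
      have hc1' : ¬ ((bT ++ [w]).length ≥ 8 ∧ acc + k ≥ 120) := by tauto
      have hc2 : ¬ (acc + k ≥ 120 ∧ (w ∈ ([".", "!", "?", "…"] : List String) ∨ bT.length + 1 ≥ 8)) := by
        tauto
      simp only [hc1, hc1', hc2, if_false]
      rw [ih (bT ++ [w]) (bC ++ [k]) (acc + k) (by simp [hlen]) (Or.inl (by simp))]
      have hge : bT.length + 1 ≤ takeLineGo rest (acc + k) (bT.length + 1) :=
        takeLineGo_ge rest (acc + k) (bT.length + 1)
      have hlen' : (bT ++ [w]).length = bT.length + 1 := by simp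
      rw [hlen']
      have hsub : takeLineGo rest (acc + k) (bT.length + 1) - bT.length
          = (takeLineGo rest (acc + k) (bT.length + 1) - (bT.length + 1)) + 1 := by omega
      rw [hsub]
      simp [List.take_succ_cons, List.drop_succ_cons]

theorem specA_eq_groupGo (pairs : List (String × Int)) :
    specA pairs [] [] 0 = groupGo pairs := by
  induction hn : pairs.length using Nat.strong_induction_on generalizing pairs with
  | _ n ih =>
    match pairs with
    | [] => simp [specA, groupGo]
    | p :: rest =>
      rw [specA_line (p :: rest) [] [] 0 rfl (Or.inr (by simp))]
      rw [groupGo]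
      simp only [List.length_nil, Nat.sub_zero, List.nil_append]
      have h1 : 1 ≤ takeLineGo (p :: rest) 0 0 := by
        obtain ⟨w, k⟩ := p
        simp only [takeLineGo]
        split
        · omega
        · exact le_trans (by omega) (takeLineGo_ge _ _ 1)
      congr 1
      exact ih ((p :: rest).drop (takeLineGo (p :: rest) 0 0)).length
        (by subst hn; simp [List.length_drop]; omega) _ rfl

-- ===== VERDICT (by name: the statement is the Claim_ definition above) =====
theorem group_lines_spec : Claim_equal_group_lines := by
  intro tokens cs _
  unfold Spec_group_lines group_lines group_lines_alt
  rw [specA_sound (tokens.zip cs) [] [] [] 0, specA_eq_groupGo]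
  simp
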